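-- pv_equiv track=rewrite | github.com/zhentingqi/scylla | modules/Task.py | none_or_more
-- ===== SOURCE A (Python) =====
-- def none_or_more(processed_input):
--     n = 0
--     for i in range(len(processed_input)):
--         for j in range(i + 1, len(processed_input)):
--             for k in range(j + 1, len(processed_input)):
--                 if (processed_input[i] + processed_input[j] + processed_input[k]) % 10 == 0:
--                     n += 1
--     return n == 0
-- ===== SOURCE B (Python) =====
-- def none_or_more(processed_input):
--     cnt = [0] * 10
--     for x in processed_input:
--         cnt[x % 10] += 1
--
--     def feasible(a, b, c):
--         if a == b and b == c:
--             return cnt[a] >= 3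
--         if a == b:
--             return cnt[a] >= 2 and cnt[c] >= 1
--         if b == c:
--             return cnt[a] >= 1 and cnt[b] >= 2
--         return cnt[a] >= 1 and cnt[b] >= 1 and cnt[c] >= 1
--
--     return not any(feasible(a, b, c)
--                    for a in range(10)
--                    for b in range(a, 10)
--                    for c in range(b, 10)
--                    if (a + b + c) % 10 == 0)
-- ===== Notes on version B (the rewrite author's own statement) =====
-- stated objective: faster
-- what changed: Replaced the O(n^3) scan over all index triples by a single pass that buckets elements by residue mod 10 and then checks the constant set of sorted residue triples (a<=b<=c, a+b+c=0 mod 10) for feasibility against the bucket counts.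
import Mathlib
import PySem

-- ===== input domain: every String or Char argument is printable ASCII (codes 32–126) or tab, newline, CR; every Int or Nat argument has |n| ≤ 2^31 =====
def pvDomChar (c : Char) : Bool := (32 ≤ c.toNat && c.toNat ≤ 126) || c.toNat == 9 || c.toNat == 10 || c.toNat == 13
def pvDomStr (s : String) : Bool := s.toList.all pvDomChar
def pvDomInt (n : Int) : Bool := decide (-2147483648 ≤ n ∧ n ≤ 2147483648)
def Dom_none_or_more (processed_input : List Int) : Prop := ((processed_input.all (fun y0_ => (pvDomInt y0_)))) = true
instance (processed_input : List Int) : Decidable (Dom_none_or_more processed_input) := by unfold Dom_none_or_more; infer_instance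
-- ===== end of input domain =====

-- B replaces A's O(n^3) triple scan by residue-mod-10 bucket counts plus a constant check of sorted residue triples (objective: faster, asymptotic).


-- ===== PORT A =====
def none_or_more (processed_input : List Int) : Bool :=
  let n : Int := (PySem.List.pyRange 0 (PySem.List.len processed_input) 1).foldl
    (fun n i =>
      (PySem.List.pyRange (i + 1) (PySem.List.len processed_input) 1).foldl
        (fun n j =>
          (PySem.List.pyRange (j + 1) (PySem.List.len processed_input) 1).foldl
            (fun n k =>
              if PySem.Int.mod (PySem.List.pyGetD processed_input i 0 + PySem.List.pyGetD processed_input j 0 + PySem.List.pyGetD processed_input k 0) 10 = 0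
              then n + 1 else n)
            n)
        n)
    0
  n == 0

-- ===== PORT B =====
def none_or_more_alt (processed_input : List Int) : Bool :=
  -- cnt = [0]*10; for x in processed_input: cnt[x % 10] += 1
  -- (the index x % 10 is Python's mod with positive divisor, hence in [0,10): .toNat is exact)
  let cnt : List Int := processed_input.foldl
    (fun cnt x => cnt.modify (PySem.Int.mod x 10).toNat (· + 1)) (List.replicate 10 (0 : Int))
  let feasible : Int → Int → Int → Bool := fun a b c =>
    if a = b ∧ b = c then decide (PySem.List.pyGetD cnt a 0 ≥ 3)
    else if a = b then decide (PySem.List.pyGetD cnt a 0 ≥ 2 ∧ PySem.List.pyGetD cnt c 0 ≥ 1)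
    else if b = c then decide (PySem.List.pyGetD cnt a 0 ≥ 1 ∧ PySem.List.pyGetD cnt b 0 ≥ 2)
    else decide (PySem.List.pyGetD cnt a 0 ≥ 1 ∧ PySem.List.pyGetD cnt b 0 ≥ 1 ∧ PySem.List.pyGetD cnt c 0 ≥ 1)
  !((PySem.List.pyRange 0 10 1).any fun a =>
      (PySem.List.pyRange a 10 1).any fun b =>
        (PySem.List.pyRange b 10 1).any fun c =>
          decide (PySem.Int.mod (a + b + c) 10 = 0) && feasible a b c)

-- ===== PRECONDITION & SPEC =====
def Spec_none_or_more (processed_input : List Int) (out : Bool) : Prop := out = none_or_more_alt processed_input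
instance (processed_input : List Int) (out : Bool) : Decidable (Spec_none_or_more processed_input out) := by unfold Spec_none_or_more; infer_instance

-- ===== CLAIM (what is proved, stated in full; the proofs are below) =====
def Claim_equal_none_or_more : Prop := ∀ (processed_input : List Int), Dom_none_or_more processed_input → Spec_none_or_more processed_input (none_or_more processed_input)

-- ===== LEMMAS AND PROOFS =====

-- residues mod 10 of the input
def pvRes (xs : List Int) : List Int := xs.map (fun x => PySem.Int.mod x 10)

def pvCount (xs : List Int) (r : Int) : Nat := (pvRes xs).count r

-- the common characterisation: some 3-element sub-multiset of the residues sums to 0 mod 10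
def pvGood (xs : List Int) : Prop :=
  ∃ a b c : Int, ({a, b, c} : Multiset Int) ≤ (pvRes xs : Multiset Int) ∧ PySem.Int.mod (a + b + c) 10 = 0

-- index form of A's search
def pvTriple (xs : List Int) : Prop :=
  ∃ i j k : Int, 0 ≤ i ∧ i < j ∧ j < k ∧ k < PySem.List.len xs ∧
    PySem.Int.mod (PySem.List.pyGetD xs i 0 + PySem.List.pyGetD xs j 0 + PySem.List.pyGetD xs k 0) 10 = 0

lemma pv_mod_bounds (x : Int) : 0 ≤ PySem.Int.mod x 10 ∧ PySem.Int.mod x 10 < 10 := by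
  rw [PySem.Int.mod_eq_emod_of_pos (by norm_num)]
  exact ⟨Int.emod_nonneg x (by norm_num), Int.emod_lt_of_pos x (by norm_num)⟩

lemma pv_mod_add3 (x y z : Int) :
    PySem.Int.mod (x + y + z) 10 =
    PySem.Int.mod (PySem.Int.mod x 10 + PySem.Int.mod y 10 + PySem.Int.mod z 10) 10 := by
  simp only [PySem.Int.mod_eq_emod_of_pos (by norm_num : (0:Int) < 10)]
  omega

lemma pv_mem_res_bounds {xs : List Int} {r : Int} (h : r ∈ pvRes xs) : 0 ≤ r ∧ r < 10 := by
  simp only [pvRes, List.mem_map] at h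
  obtain ⟨x, -, rfl⟩ := h
  exact pv_mod_bounds x

lemma pv_idx_of_sub1 {xs : List Int} {p : Int} (h : List.Sublist [p] xs) :
    ∃ i, i < xs.length ∧ xs.getD i 0 = p := by
  induction xs with
  | nil => cases h
  | cons x xs ih =>
    cases h with
    | cons _ h => obtain ⟨i, hi, hp⟩ := ih h; exact ⟨i + 1, by simpa using hi, by simpa using hp⟩
    | cons₂ _ h => exact ⟨0, by simp, by simp⟩

lemma pv_idx_of_sub2 {xs : List Int} {p q : Int} (h : List.Sublist [p, q] xs) :
    ∃ i j, i < j ∧ j < xs.length ∧ xs.getD i 0 = p ∧ xs.getD j 0 = q := by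
  induction xs with
  | nil => cases h
  | cons x xs ih =>
    cases h with
    | cons _ h =>
      obtain ⟨i, j, hij, hj, hp, hq⟩ := ih h
      exact ⟨i + 1, j + 1, by omega, by simpa using hj, by simpa using hp, by simpa using hq⟩
    | cons₂ _ h =>
      obtain ⟨j, hj, hq⟩ := pv_idx_of_sub1 h
      exact ⟨0, j + 1, by omega, by simpa using hj, by simp, by simpa using hq⟩

lemma pv_idx_of_sub3 {xs : List Int} {p q r : Int} (h : List.Sublist [p, q, r] xs) :
    ∃ i j k, i < j ∧ j < k ∧ k < xs.length ∧ xs.getD i 0 = p ∧ xs.getD j 0 = q ∧ xs.getD k 0 = r := by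
  induction xs with
  | nil => cases h
  | cons x xs ih =>
    cases h with
    | cons _ h =>
      obtain ⟨i, j, k, hij, hjk, hk, hp, hq, hr⟩ := ih h
      exact ⟨i + 1, j + 1, k + 1, by omega, by omega, by simpa using hk,
        by simpa using hp, by simpa using hq, by simpa using hr⟩
    | cons₂ _ h =>
      obtain ⟨j, k, hjk, hk, hq, hr⟩ := pv_idx_of_sub2 h
      exact ⟨0, j + 1, k + 1, by omega, by omega, by simpa using hk, by simp,
        by simpa using hq, by simpa using hr⟩

lemma pv_sub1_of_idx (xs : List Int) {i : Nat} (hi : i < xs.length) :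
    List.Sublist [xs.getD i 0] xs := by
  induction xs generalizing i with
  | nil => simp at hi
  | cons x xs ih =>
    cases i with
    | zero => simpa using List.Sublist.cons₂ x (List.nil_sublist xs)
    | succ i => simpa using List.Sublist.cons x (ih (by simpa using hi))

lemma pv_sub2_of_idx (xs : List Int) {i j : Nat} (hij : i < j) (hj : j < xs.length) :
    List.Sublist [xs.getD i 0, xs.getD j 0] xs := by
  induction xs generalizing i j with
  | nil => simp at hj
  | cons x xs ih =>
    cases i with
    | zero =>
      obtain ⟨j', rfl⟩ : ∃ j', j = j' + 1 := ⟨j - 1, by omega⟩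
      simpa using List.Sublist.cons₂ x (pv_sub1_of_idx xs (by simpa using hj))
    | succ i =>
      obtain ⟨j', rfl⟩ : ∃ j', j = j' + 1 := ⟨j - 1, by omega⟩
      simpa using List.Sublist.cons x (ih (by omega) (by simpa using hj))

lemma pv_sub3_of_idx (xs : List Int) {i j k : Nat} (hij : i < j) (hjk : j < k) (hk : k < xs.length) :
    List.Sublist [xs.getD i 0, xs.getD j 0, xs.getD k 0] xs := by
  induction xs generalizing i j k with
  | nil => simp at hk
  | cons x xs ih =>
    cases i with
    | zero =>
      obtain ⟨j', rfl⟩ : ∃ j', j = j' + 1 := ⟨j - 1, by omega⟩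
      obtain ⟨k', rfl⟩ : ∃ k', k = k' + 1 := ⟨k - 1, by omega⟩
      simpa using List.Sublist.cons₂ x (pv_sub2_of_idx xs (by omega) (by simpa using hk))
    | succ i =>
      obtain ⟨j', rfl⟩ : ∃ j', j = j' + 1 := ⟨j - 1, by omega⟩
      obtain ⟨k', rfl⟩ : ∃ k', k = k' + 1 := ⟨k - 1, by omega⟩
      simpa using List.Sublist.cons x (ih (by omega) (by omega) (by simpa using hk))

lemma pv_sum_map_eq_zero {α : Type} (l : List α) (f : α → Int) (h : ∀ x ∈ l, 0 ≤ f x) :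
    (l.map f).sum = 0 ↔ ∀ x ∈ l, f x = 0 := by
  induction l with
  | nil => simp
  | cons x l ih =>
    have hx := h x (by simp)
    have hl : 0 ≤ (l.map f).sum := by
      apply List.sum_nonneg
      intro z hz
      obtain ⟨y, hy, rfl⟩ := List.mem_map.mp hz
      exact h y (List.mem_cons_of_mem _ hy)
    rw [List.map_cons, List.sum_cons]
    constructor
    · intro h0
      have hfx : f x = 0 := by omega
      have := (ih (fun y hy => h y (List.mem_cons_of_mem _ hy))).mp (by omega)
      intro y hy
      rcases List.mem_cons.mp hy with rfl | hy
      · exact hfx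
      · exact this y hy
    · intro h0
      have := (ih (fun y hy => h y (List.mem_cons_of_mem _ hy))).mpr
        (fun y hy => h0 y (List.mem_cons_of_mem _ hy))
      have := h0 x (by simp)
      omega

lemma pv_A_iff (xs : List Int) : none_or_more xs = true ↔ ¬ pvTriple xs := by
  unfold none_or_more
  simp only [beq_iff_eq]
  have hinner : ∀ (i j n : Int),
      (PySem.List.pyRange (j + 1) (PySem.List.len xs) 1).foldl
        (fun n k => if PySem.Int.mod (PySem.List.pyGetD xs i 0 + PySem.List.pyGetD xs j 0 + PySem.List.pyGetD xs k 0) 10 = 0 then n + 1 else n) n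
      = n + ((PySem.List.pyRange (j + 1) (PySem.List.len xs) 1).countP
          (fun k => decide (PySem.Int.mod (PySem.List.pyGetD xs i 0 + PySem.List.pyGetD xs j 0 + PySem.List.pyGetD xs k 0) 10 = 0)) : Int) :=
    fun i j n => PySem.List.foldl_ite_add_one _ _ _
  simp only [hinner, PySem.List.foldl_add, zero_add]
  rw [pv_sum_map_eq_zero]
  · constructor
    · intro h htrip
      obtain ⟨i, j, k, h0, hij, hjk, hk, hm⟩ := htrip
      have hi : i ∈ PySem.List.pyRange 0 (PySem.List.len xs) 1 := PySem.List.mem_pyRange_one.mpr ⟨h0, by omega⟩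
      have := h i hi
      rw [pv_sum_map_eq_zero] at this
      · have hj : j ∈ PySem.List.pyRange (i + 1) (PySem.List.len xs) 1 := PySem.List.mem_pyRange_one.mpr ⟨by omega, by omega⟩
        have h2 := this j hj
        have : (PySem.List.pyRange (j + 1) (PySem.List.len xs) 1).countP
            (fun k => decide (PySem.Int.mod (PySem.List.pyGetD xs i 0 + PySem.List.pyGetD xs j 0 + PySem.List.pyGetD xs k 0) 10 = 0)) = 0 := by
          exact_mod_cast h2
        rw [List.countP_eq_zero] at this
        have hfin := this k (PySem.List.mem_pyRange_one.mpr ⟨by omega, by omega⟩)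
        rw [decide_eq_true_eq] at hfin
        exact hfin hm
      · intro j hj
        positivity
    · intro h i hi
      rw [pv_sum_map_eq_zero]
      · intro j hj
        have : (PySem.List.pyRange (j + 1) (PySem.List.len xs) 1).countP
            (fun k => decide (PySem.Int.mod (PySem.List.pyGetD xs i 0 + PySem.List.pyGetD xs j 0 + PySem.List.pyGetD xs k 0) 10 = 0)) = 0 := by
          rw [List.countP_eq_zero]
          intro k hk
          simp only [decide_eq_true_eq]
          intro hm
          exact h ⟨i, j, k, (PySem.List.mem_pyRange_one.mp hi).1,
            by have := PySem.List.mem_pyRange_one.mp hj; omega,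
            by have := PySem.List.mem_pyRange_one.mp hk; omega,
            (PySem.List.mem_pyRange_one.mp hk).2, hm⟩
        exact_mod_cast this
      · intro j hj; positivity
  · intro i hi
    apply List.sum_nonneg
    intro z hz
    obtain ⟨y, hy, rfl⟩ := List.mem_map.mp hz
    positivity

lemma pv_cnt_fold (xs : List Int) : ∀ (acc : List Int), acc.length = 10 → ∀ j : Nat, j < 10 →
    (xs.foldl (fun c x => c.modify (PySem.Int.mod x 10).toNat (· + 1)) acc).getD j 0
    = acc.getD j 0 + (xs.countP (fun x => (PySem.Int.mod x 10).toNat == j) : Int) := by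
  induction xs with
  | nil => simp
  | cons x xs ih =>
    intro acc hacc j hj
    rw [List.foldl_cons, ih _ (by simpa using hacc) j hj]
    have hjlen : j < acc.length := by omega
    have hstep : (acc.modify (PySem.Int.mod x 10).toNat (· + 1)).getD j 0
        = acc.getD j 0 + if (PySem.Int.mod x 10).toNat = j then 1 else 0 := by
      rw [List.getD_eq_getElem?_getD, List.getElem?_modify]
      rw [List.getD_eq_getElem?_getD, List.getElem?_eq_getElem hjlen]
      simp only [Option.map_eq_map, Option.map_some, Option.getD_some]
      split <;> omega
    rw [hstep, List.countP_cons]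
    simp only [beq_iff_eq]
    push_cast
    split_ifs <;> ring
lemma pv_cnt_val (xs : List Int) {r : Int} (h0 : 0 ≤ r) (h10 : r < 10) :
    PySem.List.pyGetD (xs.foldl (fun c x => c.modify (PySem.Int.mod x 10).toNat (· + 1)) (List.replicate 10 (0:Int))) r 0
    = (pvCount xs r : Int) := by
  rw [PySem.List.pyGetD_of_nonneg _ _ h0, pv_cnt_fold xs _ (by simp) r.toNat (by omega)]
  have hrep : (List.replicate 10 (0:Int)).getD r.toNat 0 = 0 := by
    rw [List.getD_eq_getElem?_getD, List.getElem?_replicate]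
    split <;> simp
  rw [hrep, zero_add]
  congr 1
  rw [pvCount, pvRes, List.count_eq_countP, List.countP_map]
  apply List.countP_congr
  intro x _
  have := pv_mod_bounds x
  simp only [Function.comp, beq_iff_eq]
  constructor <;> intro h <;> omega

lemma pv_count_coe (xs : List Int) (r : Int) :
    Multiset.count r ((pvRes xs : List Int) : Multiset Int) = pvCount xs r := by
  simp [pvCount]

lemma pv_feas_iff (xs : List Int) (a b c : Int) (hab : a ≤ b) (hbc : b ≤ c) :
    (({a, b, c} : Multiset Int) ≤ (pvRes xs : Multiset Int)) ↔
    (if a = b ∧ b = c then 3 ≤ pvCount xs a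
     else if a = b then 2 ≤ pvCount xs a ∧ 1 ≤ pvCount xs c
     else if b = c then 1 ≤ pvCount xs a ∧ 2 ≤ pvCount xs b
     else 1 ≤ pvCount xs a ∧ 1 ≤ pvCount xs b ∧ 1 ≤ pvCount xs c) := by
  rw [Multiset.le_iff_count]
  split_ifs with h1 h2 h3
  · obtain ⟨rfl, rfl⟩ : a = b ∧ b = c := h1
    constructor
    · intro h
      have := h a
      rw [pv_count_coe] at this
      simp [Multiset.insert_eq_cons, Multiset.count_cons, Multiset.count_singleton] at this
      omega
    · intro h r
      rw [pv_count_coe]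
      by_cases hr : r = a <;>
        simp [Multiset.insert_eq_cons, Multiset.count_cons, Multiset.count_singleton, hr] <;> omega
  · obtain rfl : a = b := h2
    have hac : a ≠ c := fun h => h1 ⟨rfl, h⟩
    constructor
    · intro h
      have h3 := h a
      have h4 := h c
      rw [pv_count_coe] at h3 h4
      simp [Multiset.insert_eq_cons, Multiset.count_cons, Multiset.count_singleton, hac, Ne.symm hac] at h3 h4
      omega
    · intro h r
      rw [pv_count_coe]
      by_cases hr : r = a
      · subst hr
        simp [Multiset.insert_eq_cons, Multiset.count_cons, Multiset.count_singleton, hac]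
        omega
      · by_cases hrc : r = c
        · subst hrc
          simp [Multiset.insert_eq_cons, Multiset.count_cons, Multiset.count_singleton, Ne.symm hac, hr]
          omega
        · simp [Multiset.insert_eq_cons, Multiset.count_cons, Multiset.count_singleton, hr, hrc]
  · obtain rfl : b = c := h3
    have hab' : a ≠ b := fun h => h1 ⟨h, rfl⟩
    constructor
    · intro h
      have h4 := h a
      have h5 := h b
      rw [pv_count_coe] at h4 h5
      simp [Multiset.insert_eq_cons, Multiset.count_cons, Multiset.count_singleton, hab', Ne.symm hab'] at h4 h5
      omega
    · intro h r
      rw [pv_count_coe]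
      by_cases hr : r = a
      · subst hr
        simp [Multiset.insert_eq_cons, Multiset.count_cons, Multiset.count_singleton, hab']
        omega
      · by_cases hrb : r = b
        · subst hrb
          simp [Multiset.insert_eq_cons, Multiset.count_cons, Multiset.count_singleton, Ne.symm hab', hr]
          omega
        · simp [Multiset.insert_eq_cons, Multiset.count_cons, Multiset.count_singleton, hr, hrb]
  · have hab' : a ≠ b := fun h => h1 ⟨h, by omega⟩
    have hbc' : b ≠ c := h3
    have hac' : a ≠ c := by omega
    constructor
    · intro h
      have h4 := h a
      have h5 := h b
      have h6 := h c
      rw [pv_count_coe] at h4 h5 h6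
      simp [Multiset.insert_eq_cons, Multiset.count_cons, Multiset.count_singleton,
        hab', hbc', hac', Ne.symm hab', Ne.symm hbc', Ne.symm hac'] at h4 h5 h6
      omega
    · intro h r
      rw [pv_count_coe]
      by_cases hr : r = a
      · subst hr
        simp [Multiset.insert_eq_cons, Multiset.count_cons, Multiset.count_singleton, hab', hac']
        omega
      · by_cases hrb : r = b
        · subst hrb
          simp [Multiset.insert_eq_cons, Multiset.count_cons, Multiset.count_singleton, Ne.symm hab', hbc']
          omega
        · by_cases hrc : r = c
          · subst hrc
            simp [Multiset.insert_eq_cons, Multiset.count_cons, Multiset.count_singleton, Ne.symm hac', Ne.symm hbc']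
            omega
          · simp [Multiset.insert_eq_cons, Multiset.count_cons, Multiset.count_singleton, hr, hrb, hrc]

lemma pv_good_sorted {xs : List Int} (h : pvGood xs) :
    ∃ a b c : Int, a ≤ b ∧ b ≤ c ∧ ({a, b, c} : Multiset Int) ≤ (pvRes xs : Multiset Int) ∧
      PySem.Int.mod (a + b + c) 10 = 0 := by
  obtain ⟨a, b, c, hle, hm⟩ := h
  have hperm : ∀ a' b' c' : Int, ({a', b', c'} : Multiset Int) = {a, b, c} → a' + b' + c' = a + b + c →
      ({a', b', c'} : Multiset Int) ≤ (pvRes xs : Multiset Int) ∧ PySem.Int.mod (a' + b' + c') 10 = 0 :=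
    fun a' b' c' he hs => ⟨he ▸ hle, by rw [hs]; exact hm⟩
  rcases le_total a b with h1 | h1 <;> rcases le_total b c with h2 | h2 <;> rcases le_total a c with h3 | h3
  · exact ⟨a, b, c, h1, h2, hle, hm⟩
  · exact ⟨a, b, c, h1, h2, hle, hm⟩
  · exact ⟨a, c, b, h3, h2, hperm a c b (by ext r; simp [Multiset.insert_eq_cons, Multiset.count_cons, Multiset.count_singleton]; split_ifs <;> omega) (by ring)⟩
  · exact ⟨c, a, b, h3, h1, hperm c a b (by ext r; simp [Multiset.insert_eq_cons, Multiset.count_cons, Multiset.count_singleton]; split_ifs <;> omega) (by ring)⟩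
  · exact ⟨b, a, c, h1, h3, hperm b a c (by ext r; simp [Multiset.insert_eq_cons, Multiset.count_cons, Multiset.count_singleton]; split_ifs <;> omega) (by ring)⟩
  · exact ⟨b, c, a, h2, h3, hperm b c a (by ext r; simp [Multiset.insert_eq_cons, Multiset.count_cons, Multiset.count_singleton]; split_ifs <;> omega) (by ring)⟩
  · exact ⟨b, a, c, h1, h3, hperm b a c (by ext r; simp [Multiset.insert_eq_cons, Multiset.count_cons, Multiset.count_singleton]; split_ifs <;> omega) (by ring)⟩
  · exact ⟨c, b, a, h2, h1, hperm c b a (by ext r; simp [Multiset.insert_eq_cons, Multiset.count_cons, Multiset.count_singleton]; split_ifs <;> omega) (by ring)⟩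

lemma pv_getD_res (xs : List Int) {i : Nat} (h : i < xs.length) :
    (pvRes xs).getD i 0 = PySem.Int.mod (xs.getD i 0) 10 := by
  simp [pvRes, List.getD_eq_getElem?_getD, List.getElem?_eq_getElem h, List.getElem?_map]

lemma pv_coe_triple (a b c : Int) : ({a, b, c} : Multiset Int) = (([a, b, c] : List Int) : Multiset Int) := by
  rfl

lemma pv_triple_iff_good (xs : List Int) : pvTriple xs ↔ pvGood xs := by
  have hlen : PySem.List.len xs = (xs.length : Int) := by simp
  constructor
  · rintro ⟨i, j, k, h0, hij, hjk, hk, hm⟩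
    rw [hlen] at hk
    have hkn : k.toNat < xs.length := by omega
    have hgi : PySem.List.pyGetD xs i 0 = xs.getD i.toNat 0 := PySem.List.pyGetD_of_nonneg xs 0 (by omega)
    have hgj : PySem.List.pyGetD xs j 0 = xs.getD j.toNat 0 := PySem.List.pyGetD_of_nonneg xs 0 (by omega)
    have hgk : PySem.List.pyGetD xs k 0 = xs.getD k.toNat 0 := PySem.List.pyGetD_of_nonneg xs 0 (by omega)
    have hsub := pv_sub3_of_idx xs (i := i.toNat) (j := j.toNat) (k := k.toNat) (by omega) (by omega) hkn
    have hsubr := hsub.map (fun x => PySem.Int.mod x 10)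
    refine ⟨PySem.Int.mod (xs.getD i.toNat 0) 10, PySem.Int.mod (xs.getD j.toNat 0) 10,
      PySem.Int.mod (xs.getD k.toNat 0) 10, ?_, ?_⟩
    · rw [pv_coe_triple]
      exact Multiset.coe_le.mpr (by simpa [pvRes] using hsubr.subperm)
    · rw [← pv_mod_add3, ← hgi, ← hgj, ← hgk]
      exact hm
  · rintro ⟨a, b, c, hle, hm⟩
    rw [pv_coe_triple] at hle
    obtain ⟨l, hperm, hsub⟩ := Multiset.coe_le.mp hle
    have h3 : l.length = 3 := by simpa using hperm.length_eq
    obtain ⟨p, q, r, rfl⟩ := List.length_eq_three.mp h3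
    obtain ⟨i, j, k, hij, hjk, hk, hp, hq, hr⟩ := pv_idx_of_sub3 hsub
    have hklen : k < xs.length := by simpa [pvRes] using hk
    have hsum : p + q + r = a + b + c := by
      have := hperm.sum_eq
      simp at this
      omega
    refine ⟨(i : Int), (j : Int), (k : Int), by omega, by exact_mod_cast hij, by exact_mod_cast hjk,
      by rw [hlen]; exact_mod_cast hklen, ?_⟩
    have hgi : PySem.List.pyGetD xs (i : Int) 0 = xs.getD i 0 := by
      rw [PySem.List.pyGetD_of_nonneg xs 0 (by omega)]; simp
    have hgj : PySem.List.pyGetD xs (j : Int) 0 = xs.getD j 0 := by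
      rw [PySem.List.pyGetD_of_nonneg xs 0 (by omega)]; simp
    have hgk : PySem.List.pyGetD xs (k : Int) 0 = xs.getD k 0 := by
      rw [PySem.List.pyGetD_of_nonneg xs 0 (by omega)]; simp
    rw [hgi, hgj, hgk, pv_mod_add3]
    rw [← pv_getD_res xs (by omega), ← pv_getD_res xs (by omega), ← pv_getD_res xs hklen]
    rw [hp, hq, hr, hsum]
    exact hm

lemma pv_B_iff (xs : List Int) : none_or_more_alt xs = true ↔ ¬ pvGood xs := by
  have hfeas : ∀ a b c : Int, 0 ≤ a → a ≤ b → b ≤ c → c < 10 →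
      ((if a = b ∧ b = c then
          decide (PySem.List.pyGetD (xs.foldl (fun cnt x => cnt.modify (PySem.Int.mod x 10).toNat (· + 1)) (List.replicate 10 (0:Int))) a 0 ≥ 3)
        else if a = b then
          decide (PySem.List.pyGetD (xs.foldl (fun cnt x => cnt.modify (PySem.Int.mod x 10).toNat (· + 1)) (List.replicate 10 (0:Int))) a 0 ≥ 2 ∧
            PySem.List.pyGetD (xs.foldl (fun cnt x => cnt.modify (PySem.Int.mod x 10).toNat (· + 1)) (List.replicate 10 (0:Int))) c 0 ≥ 1)
        else if b = c then
          decide (PySem.List.pyGetD (xs.foldl (fun cnt x => cnt.modify (PySem.Int.mod x 10).toNat (· + 1)) (List.replicate 10 (0:Int))) a 0 ≥ 1 ∧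
            PySem.List.pyGetD (xs.foldl (fun cnt x => cnt.modify (PySem.Int.mod x 10).toNat (· + 1)) (List.replicate 10 (0:Int))) b 0 ≥ 2)
        else
          decide (PySem.List.pyGetD (xs.foldl (fun cnt x => cnt.modify (PySem.Int.mod x 10).toNat (· + 1)) (List.replicate 10 (0:Int))) a 0 ≥ 1 ∧
            PySem.List.pyGetD (xs.foldl (fun cnt x => cnt.modify (PySem.Int.mod x 10).toNat (· + 1)) (List.replicate 10 (0:Int))) b 0 ≥ 1 ∧
            PySem.List.pyGetD (xs.foldl (fun cnt x => cnt.modify (PySem.Int.mod x 10).toNat (· + 1)) (List.replicate 10 (0:Int))) c 0 ≥ 1)) = true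
        ↔ ({a, b, c} : Multiset Int) ≤ (pvRes xs : Multiset Int)) := by
    intro a b c ha0 hab hbc hc10
    rw [pv_feas_iff xs a b c hab hbc]
    rw [pv_cnt_val xs ha0 (by omega), pv_cnt_val xs (by omega : (0:Int) ≤ b) (by omega),
      pv_cnt_val xs (by omega : (0:Int) ≤ c) hc10]
    split_ifs <;> simp only [decide_eq_true_eq, ge_iff_le] <;> omega
  unfold none_or_more_alt
  rw [Bool.not_eq_true']
  rw [Bool.eq_false_iff]
  apply not_congr
  simp only [List.any_eq_true, Bool.and_eq_true, decide_eq_true_eq, PySem.List.mem_pyRange_one]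
  constructor
  · rintro ⟨a, ⟨ha0, ha10⟩, b, ⟨hab, hb10⟩, c, ⟨hbc, hc10⟩, hm, hfe⟩
    exact ⟨a, b, c, (hfeas a b c ha0 hab hbc hc10).mp hfe, hm⟩
  · intro hg
    obtain ⟨a, b, c, hab, hbc, hle, hm⟩ := pv_good_sorted hg
    have ha := pv_mem_res_bounds (Multiset.mem_coe.mp (Multiset.mem_of_le hle
      (show a ∈ ({a, b, c} : Multiset Int) by simp)))
    have hc := pv_mem_res_bounds (Multiset.mem_coe.mp (Multiset.mem_of_le hle
      (show c ∈ ({a, b, c} : Multiset Int) by simp)))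
    exact ⟨a, ⟨ha.1, by omega⟩, b, ⟨hab, by omega⟩, c, ⟨hbc, hc.2⟩, hm,
      (hfeas a b c ha.1 hab hbc hc.2).mpr hle⟩

-- ===== VERDICT (by name: the statement is the Claim_ definition above) =====
theorem none_or_more_spec : Claim_equal_none_or_more := by
  intro xs _
  unfold Spec_none_or_more
  have h : none_or_more xs = true ↔ none_or_more_alt xs = true := by
    rw [pv_A_iff, pv_B_iff, pv_triple_iff_good]
  cases hA : none_or_more xs <;> cases hB : none_or_more_alt xs <;> simp_all
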